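-- pv_equiv track=rewrite | github.com/zliveze/Lappy_lab | src/components/home/emailgen.py | process_username_chunk
-- ===== SOURCE A (Python) =====
-- def normalize_gmail_address(email):
--     """
--     Chuẩn hóa địa chỉ Gmail theo quy tắc của Gmail:
--     - Với Gmail, phần sau dấu + được bỏ qua
--     - Các phần khác giữ nguyên (bao gồm cả chữ hoa/thường và vị trí dấu chấm)
--     """
--     if '@' not in email:
--         return email
--
--     username, domain = email.split('@', 1)
--
--     # Chỉ áp dụng chuẩn hóa với địa chỉ Gmail
--     if domain.lower() == 'gmail.com':
--         # Loại bỏ phần sau dấu "+" nếu có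
--         if '+' in username:
--             username = username.split('+', 1)[0]
--
--     return f"{username}@{domain}"
--
-- def process_username_chunk(chunk_data):
--     """Xử lý một nhóm username và domain để tạo biến thể email"""
--     usernames, domain, include_suffix = chunk_data
--     results = set()
--
--     is_gmail = domain.lower() == 'gmail.com'
--     normalized_results = set()  # Để kiểm tra trùng lặp sau khi chuẩn hóa
--
--     for base_username in usernames:
--         email = f"{base_username}@{domain}"
--
--         # Kiểm tra email đã tồn tại sau khi chuẩn hóa chưa
--         normalized_email = normalize_gmail_address(email)
--         if normalized_email not in normalized_results:
--             results.add(email)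
--             normalized_results.add(normalized_email)
--
--         # Thêm biến thể với suffix nếu được yêu cầu
--         # Với Gmail, chỉ cần thêm một biến thể +suffix vì tất cả suffix đều tương đương
--         if include_suffix:
--             if is_gmail:
--                 suffix_email = f"{base_username}+filter@{domain}"
--                 if normalize_gmail_address(suffix_email) not in normalized_results:
--                     results.add(suffix_email)
--                     normalized_results.add(normalize_gmail_address(suffix_email))
--             else:
--                 # Với các domain khác, có thể thêm nhiều suffix khác nhau nếu cần
--                 for suffix in range(1, 11):  # Ví dụ: thêm 10 suffix
--                     suffix_email = f"{base_username}+{suffix}@{domain}"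
--                     results.add(suffix_email)
--
--     return results
-- ===== SOURCE B (Python) =====
-- # B: two-pass generate-then-dedup — build the full candidate list first, then keep the
-- # first candidate per gmail-normalized key with one dict pass (instead of A's interleaved
-- # conditional bookkeeping over two parallel sets).
-- def normalize_gmail_address(email):
--     if '@' not in email:
--         return email
--     username, domain = email.split('@', 1)
--     if domain.lower() == 'gmail.com':
--         if '+' in username:
--             username = username.split('+', 1)[0]
--     return f"{username}@{domain}"
--
-- def process_username_chunk(chunk_data):
--     usernames, domain, include_suffix = chunk_data
--     is_gmail = domain.lower() == 'gmail.com'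
--     candidates = []
--     for base in usernames:
--         candidates.append(f"{base}@{domain}")
--         if include_suffix:
--             if is_gmail:
--                 candidates.append(f"{base}+filter@{domain}")
--             else:
--                 candidates.extend(f"{base}+{s}@{domain}" for s in range(1, 11))
--     first_by_key = {}
--     for email in candidates:
--         first_by_key.setdefault(normalize_gmail_address(email), email)
--     return set(first_by_key.values())
-- ===== Notes on version B (the rewrite author's own statement) =====
-- stated objective: alternative
-- what changed: A interleaves conditional inserts into two parallel sets (results + normalized_results) with a per-iteration gmail branch and a special-cased suffix path; B first generates the flat candidate list (branching on gmail once) and then dedups it in a single pass with one dict keeping the first candidate per normalized key.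
import Mathlib
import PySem

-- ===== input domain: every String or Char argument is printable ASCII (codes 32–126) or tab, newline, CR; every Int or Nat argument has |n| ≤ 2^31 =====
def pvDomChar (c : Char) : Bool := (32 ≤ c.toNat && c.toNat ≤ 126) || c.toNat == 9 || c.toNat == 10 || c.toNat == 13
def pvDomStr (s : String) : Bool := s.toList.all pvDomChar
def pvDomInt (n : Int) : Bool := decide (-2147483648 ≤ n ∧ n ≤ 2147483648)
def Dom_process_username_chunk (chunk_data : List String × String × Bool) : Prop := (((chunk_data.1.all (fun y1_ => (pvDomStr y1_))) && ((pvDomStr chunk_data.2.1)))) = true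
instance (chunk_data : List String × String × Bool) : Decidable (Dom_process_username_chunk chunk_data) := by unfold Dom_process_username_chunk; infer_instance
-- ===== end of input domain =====

-- B replaces A's interleaved conditional inserts into two parallel sets by a two-pass
-- generate-then-dedup: build the flat candidate list (branching on gmail once), then one
-- dict pass keeping the first candidate per normalized key (objective: alternative).

-- ===== PORT A =====
-- shared module helper (used verbatim by both Pythons)
def normalize_gmail_address (email : String) : String :=
  if PySem.Str.isIn "@" email = false then email
  else
    match PySem.Str.splitMax? email "@" 1 with
    | some (username :: domain :: _) =>
        let username :=
          if PySem.Str.lower domain == "gmail.com" then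
            if PySem.Str.isIn "+" username then
              match PySem.Str.splitMax? username "+" 1 with
              | some (u0 :: _) => u0
              | _ => username          -- unreachable: '+' in username gives two parts
            else username
          else username
        String.ofList (username.toList ++ '@' :: domain.toList)
    | _ => email                        -- unreachable: '@' in email gives two parts

-- A's loop body (verbatim; factored out only to name it)
def process_username_chunk_loop (domain : String) (include_suffix is_gmail : Bool)
    (st : PySem.Set String × PySem.Set String) (base_username : String) :
    PySem.Set String × PySem.Set String :=
  let results := st.1
  let normalized_results := st.2
  let email := String.ofList (base_username.toList ++ '@' :: domain.toList)
  let normalized_email := normalize_gmail_address email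
  let st1 :=
    if PySem.Set.contains normalized_results normalized_email = false then
      (PySem.Set.add results email, PySem.Set.add normalized_results normalized_email)
    else (results, normalized_results)
  if include_suffix then
    if is_gmail then
      let suffix_email := String.ofList (base_username.toList ++ "+filter@".toList ++ domain.toList)
      if PySem.Set.contains st1.2 (normalize_gmail_address suffix_email) = false then
        (PySem.Set.add st1.1 suffix_email, PySem.Set.add st1.2 (normalize_gmail_address suffix_email))
      else st1
    else
      ((PySem.List.pyRange 1 11 1).foldl (fun r s =>
          PySem.Set.add r (String.ofList (base_username.toList ++ '+' :: (PySem.Int.toStr s).toList ++ '@' :: domain.toList))) st1.1,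
       st1.2)
  else st1

def process_username_chunk (chunk_data : List String × String × Bool) : List String :=
  let usernames := chunk_data.1
  let domain := chunk_data.2.1
  let include_suffix := chunk_data.2.2
  let is_gmail := PySem.Str.lower domain == "gmail.com"
  let final := usernames.foldl (process_username_chunk_loop domain include_suffix is_gmail)
    (PySem.Set.empty, PySem.Set.empty)
  final.1

-- ===== PORT B =====
-- B's candidate-generation loop body (verbatim; factored out only to name it)
def process_username_chunk_alt_gen (domain : String) (include_suffix is_gmail : Bool)
    (acc : List String) (base : String) : List String :=
  let acc := acc ++ [String.ofList (base.toList ++ '@' :: domain.toList)]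
  if include_suffix then
    if is_gmail then
      acc ++ [String.ofList (base.toList ++ "+filter@".toList ++ domain.toList)]
    else
      acc ++ (PySem.List.pyRange 1 11 1).map (fun s =>
        String.ofList (base.toList ++ '+' :: (PySem.Int.toStr s).toList ++ '@' :: domain.toList))
  else acc

def process_username_chunk_alt (chunk_data : List String × String × Bool) : List String :=
  let usernames := chunk_data.1
  let domain := chunk_data.2.1
  let include_suffix := chunk_data.2.2
  let is_gmail := PySem.Str.lower domain == "gmail.com"
  let candidates := usernames.foldl (process_username_chunk_alt_gen domain include_suffix is_gmail) []
  let first_by_key := candidates.foldl (fun d e =>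
      PySem.Dict.setdefault d (normalize_gmail_address e) e) PySem.Dict.empty
  PySem.Set.ofList (PySem.Dict.values first_by_key)

-- ===== PRECONDITION & SPEC =====
def Spec_process_username_chunk (chunk_data : List String × String × Bool) (out : List String) : Prop := out = process_username_chunk_alt chunk_data
instance (chunk_data : List String × String × Bool) (out : List String) : Decidable (Spec_process_username_chunk chunk_data out) := by unfold Spec_process_username_chunk; infer_instance

-- ===== CLAIM (what is proved, stated in full; the proofs are below) =====
def Claim_equal_process_username_chunk : Prop := ∀ (chunk_data : List String × String × Bool), Dom_process_username_chunk chunk_data → Spec_process_username_chunk chunk_data (process_username_chunk chunk_data)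

-- ===== LEMMAS AND PROOFS =====

-- A's conditional "add if the normalized form is new" step on the pair (results, normalized_results)
def pvCondStep (st : PySem.Set String × PySem.Set String) (e : String) :
    PySem.Set String × PySem.Set String :=
  if PySem.Set.contains st.2 (normalize_gmail_address e) = false then
    (PySem.Set.add st.1 e, PySem.Set.add st.2 (normalize_gmail_address e))
  else st

-- B's dict step
def pvDictStep (d : PySem.Dict String String) (e : String) : PySem.Dict String String :=
  PySem.Dict.setdefault d (normalize_gmail_address e) e

-- the per-username candidate list B generates
def pvCandsOf (domain : String) (include_suffix is_gmail : Bool) (base : String) : List String :=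
  [String.ofList (base.toList ++ '@' :: domain.toList)] ++
  (if include_suffix then
     if is_gmail then
       [String.ofList (base.toList ++ "+filter@".toList ++ domain.toList)]
     else
       (PySem.List.pyRange 1 11 1).map (fun s =>
         String.ofList (base.toList ++ '+' :: (PySem.Int.toStr s).toList ++ '@' :: domain.toList))
   else [])


-- ---- splitting "u@rest" at the FIRST '@' (unfolding PySem.Chars.splitOnMax's fuelled loop) ----

theorem pv_go_zero (fuel : Nat) (l cur : List Char) (acc : List (List Char)) :
    PySem.Chars.splitOnMax.go ['@'] fuel 0 l cur acc = ((cur.reverse ++ l) :: acc).reverse := by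
  cases fuel with
  | zero => simp [PySem.Chars.splitOnMax.go]
  | succ f => cases l with
    | nil => simp [PySem.Chars.splitOnMax.go]
    | cons c rest => simp [PySem.Chars.splitOnMax.go]

theorem pv_go_one (u : List Char) (hu : '@' ∉ u) :
    ∀ (fuel : Nat) (d cur : List Char) (acc : List (List Char)), u.length + 1 ≤ fuel →
    PySem.Chars.splitOnMax.go ['@'] fuel 1 (u ++ '@' :: d) cur acc
      = (((cur.reverse ++ u) :: acc).reverse) ++ [d] := by
  induction u with
  | nil =>
    intro fuel d cur acc hf
    cases fuel with
    | zero => omega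
    | succ f =>
      simp only [List.nil_append]
      rw [PySem.Chars.splitOnMax.go]
      simp [pv_go_zero]
  | cons c u ih =>
    intro fuel d cur acc hf
    cases fuel with
    | zero => omega
    | succ f =>
      have hc : c ≠ '@' := by intro h; exact hu (by simp [h])
      simp only [List.cons_append]
      rw [PySem.Chars.splitOnMax.go]
      have : List.isPrefixOf ['@'] (c :: (u ++ '@' :: d)) = false := by
        simp [List.isPrefixOf]; exact fun h => absurd h.symm hc
      simp only [this, if_neg (by omega : ¬ (1 : Nat) = 0), Bool.false_eq_true, if_false]
      rw [ih (by intro h; exact hu (by simp [h])) f d (c :: cur) acc (by simpa using Nat.lt_of_succ_le hf)]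
      simp

theorem pv_split_at (t1 t2 : List Char) (h : '@' ∉ t1) :
    PySem.Chars.splitOnMax (t1 ++ '@' :: t2) ['@'] 1 = [t1, t2] := by
  unfold PySem.Chars.splitOnMax
  rw [if_neg (by omega)]
  rw [show Int.toNat 1 = 1 from rfl]
  rw [pv_go_one t1 h _ t2 [] [] (by simp)]
  simp

theorem pv_decompose (s D : List Char) :
    ∃ t1 t2, s ++ '@' :: D = t1 ++ '@' :: t2 ∧ '@' ∉ t1 ∧ ('@' ∈ t2 ∨ t2 = D) := by
  induction s with
  | nil => exact ⟨[], D, by simp⟩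
  | cons c s ih =>
    by_cases hc : c = '@'
    · exact ⟨[], s ++ '@' :: D, by simp [hc], by simp, Or.inl (by simp)⟩
    · obtain ⟨t1, t2, heq, hmem, hd⟩ := ih
      exact ⟨c :: t1, t2, by simp [heq], by simp [hmem]; exact fun h => hc h.symm, hd⟩

-- for a non-gmail domain, normalize_gmail_address never changes "s@domain"
theorem pv_normalize_id (s : List Char) (domain : String)
    (hng : PySem.Str.lower domain ≠ "gmail.com") :
    normalize_gmail_address (String.ofList (s ++ '@' :: domain.toList))
      = String.ofList (s ++ '@' :: domain.toList) := by
  obtain ⟨t1, t2, heq, hmem, hd⟩ := pv_decompose s domain.toList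
  unfold normalize_gmail_address
  have hin : PySem.Str.isIn "@" (String.ofList (s ++ '@' :: domain.toList)) = true := by
    rw [PySem.Str.isIn_iff_infix]
    exact ⟨s, domain.toList, by simp⟩
  rw [hin]
  simp only [Bool.true_eq_false, if_false]
  have hsplit : PySem.Str.splitMax? (String.ofList (s ++ '@' :: domain.toList)) "@" 1
      = some [String.ofList t1, String.ofList t2] := by
    unfold PySem.Str.splitMax? PySem.Chars.splitMax?
    have h2 : ("@" : String).toList = ['@'] := by decide
    simp only [String.toList_ofList, h2]
    rw [heq, if_neg (by simp), pv_split_at t1 t2 hmem]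
    simp
  rw [hsplit]
  have hng2 : (PySem.Str.lower (String.ofList t2) == "gmail.com") = false := by
    rcases hd with hat | hD
    · apply beq_eq_false_iff_ne.mpr
      intro hcon
      have : '@' ∈ (PySem.Str.lower (String.ofList t2)).toList := by
        rw [PySem.Str.toList_lower]
        simp only [String.toList_ofList]
        exact List.mem_map.mpr ⟨'@', hat, by decide⟩
      rw [hcon] at this
      revert this; decide
    · subst hD
      apply beq_eq_false_iff_ne.mpr
      simpa using hng
  simp only [hng2, Bool.false_eq_true, if_false, String.toList_ofList]
  rw [← heq]

-- ---- gmail branch: A's pair of sets tracks B's dict exactly ----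

theorem pv_contains_false {α : Type} [BEq α] [LawfulBEq α] {s : PySem.Set α} {x : α}
    (h : x ∉ s) : PySem.Set.contains s x = false := by
  cases hc : PySem.Set.contains s x
  · rfl
  · exact absurd ((PySem.Set.contains_iff _ _).mp hc) h

theorem pv_gmail_fold (cands : List String) : ∀ (d : PySem.Dict String String),
    d.keys.Nodup → (∀ p ∈ d.items, p.1 = normalize_gmail_address p.2) → (d.values).Nodup →
    cands.foldl pvCondStep (d.values, d.keys)
      = ((cands.foldl pvDictStep d).values, (cands.foldl pvDictStep d).keys)
    ∧ (cands.foldl pvDictStep d).keys.Nodup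
    ∧ (∀ p ∈ (cands.foldl pvDictStep d).items, p.1 = normalize_gmail_address p.2)
    ∧ ((cands.foldl pvDictStep d).values).Nodup := by
  induction cands with
  | nil => intro d h1 h2 h3; exact ⟨rfl, h1, h2, h3⟩
  | cons e cands ih =>
    intro d h1 h2 h3
    simp only [List.foldl_cons]
    by_cases hc : d.contains (normalize_gmail_address e) = true
    · have hstep : pvDictStep d e = d := by
        unfold pvDictStep; exact PySem.Dict.setdefault_of_contains d e hc
      have hcond : pvCondStep (d.values, d.keys) e = (d.values, d.keys) := by
        unfold pvCondStep
        have hkm : normalize_gmail_address e ∈ d.keys :=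
          (PySem.Dict.contains_iff_mem_keys d _).mp hc
        rw [if_neg (by simp [hkm])]
      rw [hstep, hcond]; exact ih d h1 h2 h3
    · have hc' : d.contains (normalize_gmail_address e) = false := by simpa using hc
      have hnk : normalize_gmail_address e ∉ d.keys := by
        intro hm
        rw [(PySem.Dict.contains_iff_mem_keys d _).mpr hm] at hc'
        exact absurd hc' (by simp)
      have hne : e ∉ d.values := by
        intro hm
        have hm' : ∃ a, (a, e) ∈ d.items := by simpa [PySem.Dict.values] using hm
        obtain ⟨a, hp⟩ := hm'
        have ha : a = normalize_gmail_address e := h2 (a, e) hp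
        apply hnk
        have hkm : a ∈ d.keys := by
          simp only [PySem.Dict.keys]; exact List.mem_map.mpr ⟨(a, e), hp, rfl⟩
        rwa [ha] at hkm
      have hstep : pvDictStep d e = d.insert (normalize_gmail_address e) e := by
        unfold pvDictStep; exact PySem.Dict.setdefault_of_not_contains d e hc'
      have hitems : (d.insert (normalize_gmail_address e) e).items
          = d.items ++ [(normalize_gmail_address e, e)] :=
        PySem.Dict.items_insert_of_not_contains d e hc'
      have hkeys : (d.insert (normalize_gmail_address e) e).keys
          = d.keys ++ [normalize_gmail_address e] := by
        simp [PySem.Dict.keys, hitems]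
      have hvals : (d.insert (normalize_gmail_address e) e).values = d.values ++ [e] := by
        simp [PySem.Dict.values, hitems]
      have hcond : pvCondStep (d.values, d.keys) e
          = (d.values ++ [e], d.keys ++ [normalize_gmail_address e]) := by
        unfold pvCondStep
        simp [hnk, PySem.Set.add_of_not_mem hne]
      rw [hstep, hcond, ← hvals, ← hkeys]
      refine ih _ ?_ ?_ ?_
      · rw [hkeys]
        simp [List.nodup_append, h1]
        exact fun a ha hae => hnk (hae ▸ ha)
      · intro p hp
        rw [hitems] at hp
        rcases List.mem_append.mp hp with h | h
        · exact h2 p h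
        · simp at h; subst h; rfl
      · rw [hvals]
        simp [List.nodup_append, h3]
        exact fun a ha hae => hne (hae ▸ ha)

-- ---- non-gmail branch: B's dict is the identity dict on A's results set ----

def pvInv (R K : List String) (d : PySem.Dict String String) : Prop :=
  d.items = R.map (fun x => (x, x)) ∧ (∀ x ∈ K, x ∈ R) ∧ R.Nodup

theorem pv_ng_step_cond (R K : List String) (d : PySem.Dict String String) (e : String)
    (he : normalize_gmail_address e = e) (h : pvInv R K d) :
    pvInv (pvCondStep (R, K) e).1 (pvCondStep (R, K) e).2 (pvDictStep d e) := by
  obtain ⟨h1, h2, h3⟩ := h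
  have hkeys : d.keys = R := by simp [PySem.Dict.keys, h1, Function.comp_def]
  unfold pvCondStep pvDictStep
  rw [he]
  by_cases hK : e ∈ K
  · have hR : e ∈ R := h2 e hK
    have hcd : d.contains e = true := (PySem.Dict.contains_iff_mem_keys d e).mpr (hkeys ▸ hR)
    rw [PySem.Dict.setdefault_of_contains d e hcd,
      if_neg (by simp [hK])]
    exact ⟨h1, h2, h3⟩
  · simp only [pv_contains_false hK, if_pos]
    by_cases hR : e ∈ R
    · have hcd : d.contains e = true := (PySem.Dict.contains_iff_mem_keys d e).mpr (hkeys ▸ hR)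
      rw [PySem.Dict.setdefault_of_contains d e hcd]
      refine ⟨by simpa [PySem.Set.add_of_mem hR] using h1, ?_, by simpa [PySem.Set.add_of_mem hR] using h3⟩
      intro x hx
      rcases (PySem.Set.mem_add _ _ _).mp hx with hx | hx
      · simpa [PySem.Set.add_of_mem hR] using h2 x hx
      · simpa [PySem.Set.add_of_mem hR, hx] using hR
    · have hcd : d.contains e = false := by
        cases hc : d.contains e
        · rfl
        · exact absurd (hkeys ▸ (PySem.Dict.contains_iff_mem_keys d e).mp hc) hR
      rw [PySem.Dict.setdefault_of_not_contains d e hcd]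
      refine ⟨?_, ?_, ?_⟩
      · rw [PySem.Dict.items_insert_of_not_contains d e hcd, h1,
          PySem.Set.add_of_not_mem hR]
        simp
      · intro x hx
        rcases (PySem.Set.mem_add _ _ _).mp hx with hx | hx
        · rw [PySem.Set.add_of_not_mem hR]; exact List.mem_append.mpr (Or.inl (h2 x hx))
        · rw [PySem.Set.add_of_not_mem hR, hx]; simp
      · rw [PySem.Set.add_of_not_mem hR]
        simp [List.nodup_append, h3]
        exact fun a ha hae => hR (hae ▸ ha)

theorem pv_ng_step_add (R K : List String) (d : PySem.Dict String String) (e : String)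
    (he : normalize_gmail_address e = e) (h : pvInv R K d) :
    pvInv (PySem.Set.add R e) K (pvDictStep d e) := by
  obtain ⟨h1, h2, h3⟩ := h
  have hkeys : d.keys = R := by simp [PySem.Dict.keys, h1, Function.comp_def]
  unfold pvDictStep
  rw [he]
  by_cases hR : e ∈ R
  · have hcd : d.contains e = true := (PySem.Dict.contains_iff_mem_keys d e).mpr (hkeys ▸ hR)
    rw [PySem.Dict.setdefault_of_contains d e hcd, PySem.Set.add_of_mem hR]
    exact ⟨h1, h2, h3⟩
  · have hcd : d.contains e = false := by
      cases hc : d.contains e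
      · rfl
      · exact absurd (hkeys ▸ (PySem.Dict.contains_iff_mem_keys d e).mp hc) hR
    rw [PySem.Dict.setdefault_of_not_contains d e hcd, PySem.Set.add_of_not_mem hR]
    refine ⟨?_, ?_, ?_⟩
    · rw [PySem.Dict.items_insert_of_not_contains d e hcd, h1]; simp
    · intro x hx; exact List.mem_append.mpr (Or.inl (h2 x hx))
    · simp [List.nodup_append, h3]
      exact fun a ha hae => hR (hae ▸ ha)

theorem pv_ng_sufx (l : List String) (hl : ∀ e ∈ l, normalize_gmail_address e = e) :
    ∀ (R K : List String) (d : PySem.Dict String String), pvInv R K d →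
    pvInv (l.foldl PySem.Set.add R) K (l.foldl pvDictStep d) := by
  induction l with
  | nil => intro R K d h; exact h
  | cons e l ih =>
    intro R K d h
    exact ih (fun x hx => hl x (List.mem_cons_of_mem _ hx)) _ _ _
      (pv_ng_step_add R K d e (hl e (List.mem_cons_self)) h)


-- ---- assembly ----

theorem pv_cands (domain : String) (inc g : Bool) (usernames : List String) : ∀ acc,
    usernames.foldl (process_username_chunk_alt_gen domain inc g) acc
      = acc ++ usernames.flatMap (pvCandsOf domain inc g) := by
  induction usernames with
  | nil => intro acc; simp
  | cons b rest ih =>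
    intro acc
    simp only [List.foldl_cons, List.flatMap_cons]
    rw [ih]
    cases inc <;> cases g <;> simp [process_username_chunk_alt_gen, pvCandsOf, List.append_assoc]

theorem pv_loop_gmail (domain : String) (inc : Bool)
    (st : PySem.Set String × PySem.Set String) (b : String) :
    process_username_chunk_loop domain inc true st b
      = (pvCandsOf domain inc true b).foldl pvCondStep st := by
  cases inc <;> rfl

theorem pv_empty_dict_facts :
    (PySem.Dict.empty : PySem.Dict String String).keys.Nodup
    ∧ (∀ p ∈ (PySem.Dict.empty : PySem.Dict String String).items, p.1 = normalize_gmail_address p.2)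
    ∧ ((PySem.Dict.empty : PySem.Dict String String).values).Nodup := by
  refine ⟨?_, ?_, ?_⟩ <;> simp [PySem.Dict.empty, PySem.Dict.keys, PySem.Dict.values]

theorem pv_main_gmail (usernames : List String) (domain : String) (inc : Bool)
    (hg : (PySem.Str.lower domain == "gmail.com") = true) :
    process_username_chunk (usernames, domain, inc)
      = process_username_chunk_alt (usernames, domain, inc) := by
  have hA : process_username_chunk (usernames, domain, inc)
      = (usernames.foldl (process_username_chunk_loop domain inc (PySem.Str.lower domain == "gmail.com"))
          (PySem.Set.empty, PySem.Set.empty)).1 := rfl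
  have hB : process_username_chunk_alt (usernames, domain, inc)
      = PySem.Set.ofList (PySem.Dict.values
          ((usernames.foldl (process_username_chunk_alt_gen domain inc (PySem.Str.lower domain == "gmail.com")) []).foldl
            pvDictStep PySem.Dict.empty)) := rfl
  rw [hA, hB, hg]
  rw [pv_cands domain inc true usernames []]
  simp only [List.nil_append]
  have hloop : process_username_chunk_loop domain inc true
      = fun st b => (pvCandsOf domain inc true b).foldl pvCondStep st := by
    funext st b; exact pv_loop_gmail domain inc st b
  rw [hloop, show (usernames.foldl (fun st b => (pvCandsOf domain inc true b).foldl pvCondStep st)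
      (PySem.Set.empty, PySem.Set.empty))
      = (usernames.flatMap (pvCandsOf domain inc true)).foldl pvCondStep (PySem.Set.empty, PySem.Set.empty)
    from (List.foldl_flatMap).symm ▸ rfl]
  obtain ⟨hk, hi, hv⟩ := pv_empty_dict_facts
  obtain ⟨heq, _, _, hnd⟩ := pv_gmail_fold (usernames.flatMap (pvCandsOf domain inc true))
    PySem.Dict.empty hk hi hv
  have hinit : ((PySem.Dict.empty : PySem.Dict String String).values,
      (PySem.Dict.empty : PySem.Dict String String).keys)
      = ((PySem.Set.empty : PySem.Set String), (PySem.Set.empty : PySem.Set String)) := rfl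
  rw [← hinit, heq, PySem.Set.ofList_eq_self_of_nodup _ hnd]

theorem pv_ng_fold (domain : String) (inc : Bool)
    (hgne : PySem.Str.lower domain ≠ "gmail.com") (usernames : List String) :
    ∀ (R K : List String) (d : PySem.Dict String String), pvInv R K d →
    pvInv (usernames.foldl (process_username_chunk_loop domain inc false) (R, K)).1
          (usernames.foldl (process_username_chunk_loop domain inc false) (R, K)).2
          (usernames.foldl (fun d b => (pvCandsOf domain inc false b).foldl pvDictStep d) d) := by
  induction usernames with
  | nil => intro R K d h; exact h
  | cons b rest ih =>
    intro R K d h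
    simp only [List.foldl_cons]
    have hee : normalize_gmail_address (String.ofList (b.toList ++ '@' :: domain.toList))
        = String.ofList (b.toList ++ '@' :: domain.toList) := pv_normalize_id b.toList domain hgne
    have hstep1 := pv_ng_step_cond R K d (String.ofList (b.toList ++ '@' :: domain.toList)) hee h
    cases inc with
    | false =>
      have hb : process_username_chunk_loop domain false false (R, K) b
          = pvCondStep (R, K) (String.ofList (b.toList ++ '@' :: domain.toList)) := rfl
      have hd : (pvCandsOf domain false false b).foldl pvDictStep d
          = pvDictStep d (String.ofList (b.toList ++ '@' :: domain.toList)) := rfl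
      rw [hb, hd]
      have hres := ih (pvCondStep (R, K) (String.ofList (b.toList ++ '@' :: domain.toList))).1
        (pvCondStep (R, K) (String.ofList (b.toList ++ '@' :: domain.toList))).2
        (pvDictStep d (String.ofList (b.toList ++ '@' :: domain.toList))) hstep1
      simpa using hres
    | true =>
      have hb : process_username_chunk_loop domain true false (R, K) b
          = (((PySem.List.pyRange 1 11 1).map (fun s =>
                String.ofList (b.toList ++ '+' :: (PySem.Int.toStr s).toList ++ '@' :: domain.toList))).foldl
              PySem.Set.add (pvCondStep (R, K) (String.ofList (b.toList ++ '@' :: domain.toList))).1,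
             (pvCondStep (R, K) (String.ofList (b.toList ++ '@' :: domain.toList))).2) := by
        show (((PySem.List.pyRange 1 11 1).foldl (fun r s =>
            PySem.Set.add r (String.ofList (b.toList ++ '+' :: (PySem.Int.toStr s).toList ++ '@' :: domain.toList))) _), _) = _
        rw [List.foldl_map]
        rfl
      have hd : (pvCandsOf domain true false b).foldl pvDictStep d
          = ((PySem.List.pyRange 1 11 1).map (fun s =>
              String.ofList (b.toList ++ '+' :: (PySem.Int.toStr s).toList ++ '@' :: domain.toList))).foldl
            pvDictStep (pvDictStep d (String.ofList (b.toList ++ '@' :: domain.toList))) := by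
        simp [pvCandsOf]
      rw [hb, hd]
      refine ih _ _ _ ?_
      refine pv_ng_sufx _ ?_ _ _ _ hstep1
      intro e hme
      obtain ⟨sfx, _, rfl⟩ := List.mem_map.mp hme
      have h2 := pv_normalize_id (b.toList ++ '+' :: (PySem.Int.toStr sfx).toList) domain hgne
      simpa using h2

theorem pv_main_nongmail (usernames : List String) (domain : String) (inc : Bool)
    (hg : (PySem.Str.lower domain == "gmail.com") = false) :
    process_username_chunk (usernames, domain, inc)
      = process_username_chunk_alt (usernames, domain, inc) := by
  have hgne : PySem.Str.lower domain ≠ "gmail.com" := by simpa using hg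
  have hA : process_username_chunk (usernames, domain, inc)
      = (usernames.foldl (process_username_chunk_loop domain inc (PySem.Str.lower domain == "gmail.com"))
          (PySem.Set.empty, PySem.Set.empty)).1 := rfl
  have hB : process_username_chunk_alt (usernames, domain, inc)
      = PySem.Set.ofList (PySem.Dict.values
          ((usernames.foldl (process_username_chunk_alt_gen domain inc (PySem.Str.lower domain == "gmail.com")) []).foldl
            pvDictStep PySem.Dict.empty)) := rfl
  rw [hA, hB, hg]
  rw [pv_cands domain inc false usernames []]
  simp only [List.nil_append]
  rw [List.foldl_flatMap]
  have hinv0 : pvInv PySem.Set.empty PySem.Set.empty (PySem.Dict.empty : PySem.Dict String String) := by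
    refine ⟨?_, ?_, ?_⟩ <;> simp [PySem.Dict.empty, PySem.Set.empty]
  have h := pv_ng_fold domain inc hgne usernames PySem.Set.empty PySem.Set.empty PySem.Dict.empty hinv0
  obtain ⟨h1, _, h3⟩ := h
  have hvals : PySem.Dict.values
      (usernames.foldl (fun d b => (pvCandsOf domain inc false b).foldl pvDictStep d) PySem.Dict.empty)
      = (usernames.foldl (process_username_chunk_loop domain inc false) (PySem.Set.empty, PySem.Set.empty)).1 := by
    simp [PySem.Dict.values, h1, Function.comp_def]
  rw [hvals, PySem.Set.ofList_eq_self_of_nodup _ h3]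

-- ===== VERDICT (by name: the statement is the Claim_ definition above) =====
theorem process_username_chunk_spec : Claim_equal_process_username_chunk := by
  intro chunk_data _hdom
  obtain ⟨usernames, domain, inc⟩ := chunk_data
  unfold Spec_process_username_chunk
  cases hg : (PySem.Str.lower domain == "gmail.com") with
  | true => exact pv_main_gmail usernames domain inc hg
  | false => exact pv_main_nongmail usernames domain inc hg
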